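-- pv_equiv track=rewrite | github.com/joaovictormo/data_pirates_challenge | main.py | uf_selector
-- ===== SOURCE A (Python) =====
-- def uf_selector(list_uf):
--     '''
--     Utility function to generate the key strikes list, based on the uf's list.
--
--     Args:
--         list_uf (list): list of UFs
--     Returns:
--         list_strikes (list): list of key strikes to reach the desired UF in the <select>
--     '''
--
--     list_strikes = []
--
--     for idx, uf in enumerate(list_uf):
--         if idx == 0:
--             # if it's the first UF of the list, appends its first letter to the strikes list
--             list_strikes.append(uf[0])
--         else:
--             # checks if the first letter of the current UF equals the first letter of the last list_strikes item
--             if uf[0] == list_strikes[idx - 1][0]: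
--                 # if so, concatenates this first letter with the last list_strikes item into a new item
--                 list_strikes.append(list_strikes[idx - 1] + uf[0])
--             else:
--                 list_strikes.append(uf[0])
--
--     return list_strikes
-- ===== SOURCE B (Python) =====
-- def uf_selector(list_uf):
--     '''
--     Generate the cumulative key-strike strings by splitting the input into
--     maximal runs of consecutive UFs sharing a first letter, emitting
--     letter, letter*2, ..., letter*run for each run.
--     '''
--     out = []
--     rest = list_uf
--     while rest:
--         letter = rest[0][0]
--         run = 1
--         while run < len(rest) and rest[run][0] == letter:
--             run += 1
--         for k in range(run):
--             out.append(letter * (k + 1))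
--         rest = rest[run:]
--     return out
-- ===== Notes on version B (the rewrite author's own statement) =====
-- stated objective: alternative
-- what changed: Replaces A's self-referential single pass (each new string is built by re-reading the previously appended list entry at idx-1) with a run-based two-level pass: split the list into maximal runs of consecutive UFs sharing a first letter and emit letter*1..letter*run per run.
import Mathlib
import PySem

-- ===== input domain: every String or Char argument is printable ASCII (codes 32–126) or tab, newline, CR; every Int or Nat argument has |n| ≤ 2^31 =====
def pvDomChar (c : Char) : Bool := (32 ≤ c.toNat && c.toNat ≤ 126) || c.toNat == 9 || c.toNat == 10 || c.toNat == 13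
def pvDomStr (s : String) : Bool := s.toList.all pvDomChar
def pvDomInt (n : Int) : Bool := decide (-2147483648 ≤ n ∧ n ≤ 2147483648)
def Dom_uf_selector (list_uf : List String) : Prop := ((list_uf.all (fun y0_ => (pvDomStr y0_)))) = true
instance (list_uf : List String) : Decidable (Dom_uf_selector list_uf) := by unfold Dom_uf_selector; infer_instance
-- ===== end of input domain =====

-- B replaces A's self-referential single pass with a run-based two-level pass (same cost, different decomposition).


-- ===== PORT A =====
-- uf[0] is ported as (PySem.Str.pyGet? uf 0).getD ' ' ; the default is never read inside Pre_ (all strings nonempty).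
def uf_selector (list_uf : List String) : List String :=
  (PySem.List.enumerate list_uf).foldl (fun list_strikes p =>
    if p.1 == 0 then
      list_strikes ++ [String.ofList [(PySem.Str.pyGet? p.2 0).getD ' ']]
    else
      let prev := (PySem.List.pyGet? list_strikes (p.1 - 1)).getD ""
      if (PySem.Str.pyGet? p.2 0).getD ' ' == (PySem.Str.pyGet? prev 0).getD ' ' then
        list_strikes ++ [String.ofList (prev.toList ++ [(PySem.Str.pyGet? p.2 0).getD ' '])]
      else
        list_strikes ++ [String.ofList [(PySem.Str.pyGet? p.2 0).getD ' ']]) []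

-- ===== PORT B =====
-- inner while loop 'run < len(rest) and rest[run][0] == letter' counted structurally over the tail
def pvRunLen (c : Char) : List String → Nat
  | [] => 0
  | u :: t => if (PySem.Str.pyGet? u 0).getD ' ' == c then pvRunLen c t + 1 else 0

def pvAltGo : List String → List String
  | [] => []
  | u :: rest =>
    let c := (PySem.Str.pyGet? u 0).getD ' '
    let r := 1 + pvRunLen c rest
    ((PySem.List.pyRange 0 (r : Int) 1).map (fun k => String.ofList (List.replicate (k + 1).toNat c)))
      ++ pvAltGo ((u :: rest).drop r)
termination_by l => l.length
decreasing_by simp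

def uf_selector_alt (list_uf : List String) : List String := pvAltGo list_uf

-- ===== PRECONDITION & SPEC =====
-- Pre_ excludes lists containing an empty string: there Python A (and B) raises IndexError on uf[0].
def Pre_uf_selector (list_uf : List String) : Prop := ∀ u ∈ list_uf, u ≠ ""
instance (list_uf : List String) : Decidable (Pre_uf_selector list_uf) := by unfold Pre_uf_selector; infer_instance
def pvWitness_uf_selector : List String := ["sp", "sc", "rj", "ro", "ac"]

def Spec_uf_selector (list_uf : List String) (out : List String) : Prop := out = uf_selector_alt list_uf
instance (list_uf : List String) (out : List String) : Decidable (Spec_uf_selector list_uf out) := by unfold Spec_uf_selector; infer_instance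

-- ===== CLAIM (what is proved, stated in full; the proofs are below) =====
def Claim_equal_uf_selector : Prop := ∀ (list_uf : List String), Dom_uf_selector list_uf → Pre_uf_selector list_uf → Spec_uf_selector list_uf (uf_selector list_uf)

-- ===== LEMMAS AND PROOFS =====

def pvHd0 (u : String) : Char := (PySem.Str.pyGet? u 0).getD ' '

-- the common functional core: each new string depends only on the previous built string
def pvGoSpec (prev : String) : List String → List String
  | [] => []
  | u :: t =>
    let s := if pvHd0 u == pvHd0 prev then String.ofList (prev.toList ++ [pvHd0 u]) else String.ofList [pvHd0 u]
    s :: pvGoSpec s t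

theorem pvHd0_mk_replicate_succ (k : Nat) (c : Char) :
    pvHd0 (String.ofList (List.replicate (k + 1) c)) = c := by
  simp [pvHd0, List.replicate_succ, PySem.List.pyGet?, PySem.List.pyIdx?]

theorem pvA_loop (l acc : List String) (i : Nat) (hlen : acc.length = i) :
    (PySem.List.enumerate l (i : Int)).foldl (fun list_strikes p =>
      if p.1 == 0 then
        list_strikes ++ [String.ofList [(PySem.Str.pyGet? p.2 0).getD ' ']]
      else
        let prev := (PySem.List.pyGet? list_strikes (p.1 - 1)).getD ""
        if (PySem.Str.pyGet? p.2 0).getD ' ' == (PySem.Str.pyGet? prev 0).getD ' ' then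
          list_strikes ++ [String.ofList (prev.toList ++ [(PySem.Str.pyGet? p.2 0).getD ' '])]
        else
          list_strikes ++ [String.ofList [(PySem.Str.pyGet? p.2 0).getD ' ']]) acc
    = acc ++ pvGoSpec (acc.getLastD "") l := by
  induction l generalizing acc i with
  | nil => simp [PySem.List.enumerate_nil, pvGoSpec]
  | cons u t ih =>
    rw [PySem.List.enumerate_cons, List.foldl_cons]
    have hstep : (if ((i : Int), u).1 == 0 then
        acc ++ [String.ofList [(PySem.Str.pyGet? ((i : Int), u).2 0).getD ' ']]
      else
        let prev := (PySem.List.pyGet? acc (((i : Int), u).1 - 1)).getD ""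
        if (PySem.Str.pyGet? ((i : Int), u).2 0).getD ' ' == (PySem.Str.pyGet? prev 0).getD ' ' then
          acc ++ [String.ofList (prev.toList ++ [(PySem.Str.pyGet? ((i : Int), u).2 0).getD ' '])]
        else
          acc ++ [String.ofList [(PySem.Str.pyGet? ((i : Int), u).2 0).getD ' ']])
      = acc ++ [if pvHd0 u == pvHd0 (acc.getLastD "") then
          String.ofList ((acc.getLastD "").toList ++ [pvHd0 u]) else String.ofList [pvHd0 u]] := by
      rcases Nat.eq_zero_or_pos i with hi | hi
      · subst hi
        have hacc : acc = [] := List.length_eq_zero_iff.mp hlen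
        subst hacc
        have h0 : ((((0 : Nat) : Int), u).1 == 0) = true := by simp
        rw [if_pos h0]
        have hcollapse : (if pvHd0 u == pvHd0 (List.getLastD [] "") then
            String.ofList ((List.getLastD [] "").toList ++ [pvHd0 u]) else String.ofList [pvHd0 u])
            = String.ofList [pvHd0 u] := by
          split <;> simp
        rw [hcollapse]
        rfl
      · have h0 : ((((i : Nat) : Int), u).1 == 0) = false := by simp; omega
        rw [if_neg (by simp only [h0]; exact Bool.false_ne_true)]
        have hidx : (((i : Nat) : Int), u).1 - 1 = ((i - 1 : Nat) : Int) := by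
          simp only []
          omega
        have hprev : (PySem.List.pyGet? acc ((((i : Nat) : Int), u).1 - 1)).getD "" = acc.getLastD "" := by
          rw [hidx, PySem.List.pyGet?_natCast, List.getLastD_eq_getLast?, List.getLast?_eq_getElem?, hlen]
        rw [hprev]
        simp only [← apply_ite (fun s : String => acc ++ [s])]
        rfl
    rw [hstep]
    have hcast : ((i : Int) + 1) = (((i + 1 : Nat)) : Int) := by push_cast; ring
    rw [hcast]
    rw [ih (acc ++ [_]) (i + 1) (by simp [hlen])]
    simp [pvGoSpec, List.append_assoc]

theorem pvBoundary (t : List String) (c : Char) (u : String)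
    (h : (t.drop (pvRunLen c t)).head? = some u) : (pvHd0 u == c) = false := by
  induction t with
  | nil => simp at h
  | cons v t' ih =>
    rw [pvRunLen] at h
    by_cases hv : ((PySem.Str.pyGet? v 0).getD ' ' == c) = true
    · rw [if_pos hv, List.drop_succ_cons] at h
      exact ih h
    · rw [if_neg hv, List.drop_zero] at h
      simp only [List.head?_cons, Option.some.injEq] at h
      subst h
      simpa [pvHd0] using hv

theorem pvRun_spec (t : List String) (c : Char) (k : Nat) :
    pvGoSpec (String.ofList (List.replicate (k + 1) c)) t =
      (List.range (pvRunLen c t)).map (fun j => String.ofList (List.replicate (k + 2 + j) c))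
      ++ pvGoSpec (String.ofList (List.replicate (k + 1 + pvRunLen c t) c)) (t.drop (pvRunLen c t)) := by
  induction t generalizing k with
  | nil => simp [pvRunLen]
  | cons v t' ih =>
    rw [pvGoSpec, pvRunLen]
    by_cases hv : ((PySem.Str.pyGet? v 0).getD ' ' == c) = true
    · have hvc : pvHd0 v = c := by simpa [pvHd0] using hv
      have hcond : (pvHd0 v == pvHd0 (String.ofList (List.replicate (k + 1) c))) = true := by
        rw [pvHd0_mk_replicate_succ k c, hvc]
        exact beq_self_eq_true c
      have hs : String.ofList ((String.ofList (List.replicate (k + 1) c)).toList ++ [pvHd0 v])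
          = String.ofList (List.replicate (k + 1 + 1) c) := by
        rw [hvc]
        simp [List.replicate_succ']
      rw [if_pos hv]
      simp only [hcond, if_true, hs]
      rw [ih (k + 1)]
      rw [List.range_succ_eq_map, List.map_cons, List.map_map]
      rw [List.drop_succ_cons]
      have hm : (List.range (pvRunLen c t')).map
            ((fun j => String.ofList (List.replicate (k + 2 + j) c)) ∘ Nat.succ)
          = (List.range (pvRunLen c t')).map (fun j => String.ofList (List.replicate (k + 1 + 2 + j) c)) := by
        apply List.map_congr_left
        intro j hj
        simp only [Function.comp]
        congr 2
        omega
      rw [hm]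
      have h1 : k + 2 + 0 = k + 2 := by omega
      have h2 : k + 1 + 1 + pvRunLen c t' = k + 1 + (pvRunLen c t' + 1) := by omega
      simp only [h1, h2]
      simp [List.replicate_succ']
    · rw [if_neg hv]
      simp only [List.range_zero, List.map_nil, List.nil_append, Nat.add_zero, List.drop_zero]
      rw [pvGoSpec]

theorem pvMain : ∀ (n : Nat) (l : List String), l.length ≤ n → ∀ (prev : String),
    (∀ u, l.head? = some u → (pvHd0 u == pvHd0 prev) = false ∨ prev = "") →
    pvGoSpec prev l = pvAltGo l := by
  intro n
  induction n with
  | zero =>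
    intro l hl prev _
    have : l = [] := List.eq_nil_of_length_eq_zero (by omega)
    subst this
    simp [pvGoSpec, pvAltGo]
  | succ n ih =>
    intro l hl prev hprev
    match l with
    | [] => simp [pvGoSpec, pvAltGo]
    | u :: rest =>
      rw [pvGoSpec, pvAltGo]
      have hhead : (if pvHd0 u == pvHd0 prev then String.ofList (prev.toList ++ [pvHd0 u])
          else String.ofList [pvHd0 u]) = String.ofList [pvHd0 u] := by
        rcases hprev u rfl with hne | hemp
        · rw [hne]; simp
        · subst hemp
          split <;> simp
      rw [hhead]
      have hone : String.ofList [pvHd0 u] = String.ofList (List.replicate (0 + 1) (pvHd0 u)) := by simp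
      rw [hone, pvRun_spec rest (pvHd0 u) 0]
      rw [show ((PySem.Str.pyGet? u 0).getD ' ') = pvHd0 u from rfl]
      -- convert the pyRange comprehension to the range map
      have hrange : ((PySem.List.pyRange 0 ((1 + pvRunLen (pvHd0 u) rest : Nat) : Int) 1).map
            (fun k => String.ofList (List.replicate (k + 1).toNat (pvHd0 u))))
          = (List.range (1 + pvRunLen (pvHd0 u) rest)).map
            (fun k => String.ofList (List.replicate (k + 1) (pvHd0 u))) := by
        rw [PySem.List.pyRange_one, List.map_map]
        apply List.map_congr_left
        intro j hj
        simp only [Function.comp]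
        congr 2
        omega
      rw [hrange]
      have hn1 : 1 + pvRunLen (pvHd0 u) rest = pvRunLen (pvHd0 u) rest + 1 := by omega
      rw [hn1, List.range_succ_eq_map, List.map_cons, List.map_map, List.drop_succ_cons]
      rw [List.cons_append]
      congr 1
      congr 1
      · apply List.map_congr_left
        intro j hj
        simp only [Function.comp]
        congr 2
        omega
      · apply ih _ (by simp at hl ⊢; omega)
        intro u' hu'
        left
        rw [pvHd0_mk_replicate_succ]
        exact pvBoundary rest (pvHd0 u) u' hu'

-- ===== VERDICT (by name: the statement is the Claim_ definition above) =====
theorem uf_selector_spec : Claim_equal_uf_selector := by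
  intro l _ _
  unfold Spec_uf_selector uf_selector uf_selector_alt
  have h := pvA_loop l [] 0 rfl
  simp only [Nat.cast_zero] at h
  rw [h]
  simp only [List.nil_append, List.getLastD_nil]
  exact pvMain l.length l le_rfl "" (fun u _ => Or.inr rfl)
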